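-- pv_equiv track=rewrite | github.com/AkbasLab/IsaacLab | tools/metrics_exporter/tb_reader.py | detect_reward_tag
-- ===== SOURCE A (Python) =====
-- from typing import Dict, List, Tuple, Iterable
--
-- def detect_reward_tag(tags: List[str]) -> str | None:
--     # Heuristic: reward/return and episode/train
--     scored: List[tuple[int, str]] = []
--     for t in tags:
--         low = t.lower()
--         score = 0
--         if "reward" in low or "return" in low:
--             score += 2
--         if "episode" in low or "ep" in low:
--             score += 1
--         if "train" in low:
--             score += 1
--         if "eval" in low:
--             score -= 1
--         if score > 0:
--             scored.append((score, t))
--     if not scored: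
--         return None
--     scored.sort(key=lambda x: (-x[0], x[1]))
--     return scored[0][1]
-- ===== SOURCE B (Python) =====
-- def _score(t):
--     low = t.lower()
--     score = 0
--     if "reward" in low or "return" in low:
--         score += 2
--     if "episode" in low or "ep" in low:
--         score += 1
--     if "train" in low:
--         score += 1
--     if "eval" in low:
--         score -= 1
--     return score
--
--
-- def detect_reward_tag(tags):
--     # Single pass keeping one running best (score, tag); no list, no sort.
--     best = None
--     for t in tags:
--         s = _score(t)
--         if s > 0:
--             if best is None or s > best[0] or (s == best[0] and t < best[1]):
--                 best = (s, t)
--     return None if best is None else best[1]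
-- ===== Notes on version B (the rewrite author's own statement) =====
-- stated objective: simpler
-- what changed: Replaces build-a-scored-list-then-sort-and-take-head with a single pass that keeps one running best (score, tag) pair, updating only on strictly higher score or equal score with lexicographically smaller tag.
import Mathlib
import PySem

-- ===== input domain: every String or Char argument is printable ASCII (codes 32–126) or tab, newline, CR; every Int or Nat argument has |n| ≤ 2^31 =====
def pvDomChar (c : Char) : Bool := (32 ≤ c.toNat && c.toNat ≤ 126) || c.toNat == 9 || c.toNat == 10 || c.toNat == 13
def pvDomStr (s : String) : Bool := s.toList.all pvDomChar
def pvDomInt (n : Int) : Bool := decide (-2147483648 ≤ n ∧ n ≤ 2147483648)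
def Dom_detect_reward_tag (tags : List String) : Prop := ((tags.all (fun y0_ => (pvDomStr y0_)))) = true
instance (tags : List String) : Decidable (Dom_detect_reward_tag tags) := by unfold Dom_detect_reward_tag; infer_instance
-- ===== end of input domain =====

-- B replaces A's build-scored-list-then-sort-and-take-head with a single running-best pass (same result, simpler).


-- ===== PORT A =====
def detect_reward_tag (tags : List String) : Option String :=
  let scored : List (Int × String) := tags.foldl (fun scored t =>
    let low := PySem.Str.lower t
    let score : Int := 0
    let score := if PySem.Str.isIn "reward" low || PySem.Str.isIn "return" low then score + 2 else score
    let score := if PySem.Str.isIn "episode" low || PySem.Str.isIn "ep" low then score + 1 else score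
    let score := if PySem.Str.isIn "train" low then score + 1 else score
    let score := if PySem.Str.isIn "eval" low then score - 1 else score
    if score > 0 then scored ++ [(score, t)] else scored) []
  if scored = [] then none
  else
    match PySem.List.sorted2 scored (fun x => -x.1) (fun x => x.2) with
    | [] => none          -- unreachable: scored is nonempty
    | x :: _ => some x.2

-- ===== PORT B =====
def pvScore (t : String) : Int :=
  let low := PySem.Str.lower t
  let score : Int := 0
  let score := if PySem.Str.isIn "reward" low || PySem.Str.isIn "return" low then score + 2 else score
  let score := if PySem.Str.isIn "episode" low || PySem.Str.isIn "ep" low then score + 1 else score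
  let score := if PySem.Str.isIn "train" low then score + 1 else score
  if PySem.Str.isIn "eval" low then score - 1 else score

def detect_reward_tag_alt (tags : List String) : Option String :=
  let best := tags.foldl (fun best t =>
    let s := pvScore t
    if s > 0 then
      match best with
      | none => some (s, t)
      | some b => if s > b.1 ∨ (s = b.1 ∧ t < b.2) then some (s, t) else best
    else best) (none : Option (Int × String))
  best.map (fun b => b.2)

-- ===== PRECONDITION & SPEC =====
def Spec_detect_reward_tag (tags : List String) (out : Option String) : Prop := out = detect_reward_tag_alt tags
instance (tags : List String) (out : Option String) : Decidable (Spec_detect_reward_tag tags out) := by unfold Spec_detect_reward_tag; infer_instance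

-- ===== CLAIM (what is proved, stated in full; the proofs are below) =====
def Claim_equal_detect_reward_tag : Prop := ∀ (tags : List String), Dom_detect_reward_tag tags → Spec_detect_reward_tag tags (detect_reward_tag tags)

-- ===== LEMMAS AND PROOFS =====

-- The comparison used by A's sort on key (-score, tag)
def pvLt (a b : Int × String) : Bool :=
  decide ((-a.1) < (-b.1)) || (!decide ((-b.1) < (-a.1)) && decide (a.2 < b.2))

-- running-minimum step
def pvG (o : Option (Int × String)) (x : Int × String) : Option (Int × String) :=
  match o with
  | none => some x
  | some m => if pvLt x m then some x else some m

-- A's scored list in closed form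
def pvKeyed (tags : List String) : List (Int × String) :=
  tags.filterMap (fun t => if pvScore t > 0 then some (pvScore t, t) else none)

lemma scored_eq (tags : List String) (acc : List (Int × String)) :
    tags.foldl (fun scored t => if pvScore t > 0 then scored ++ [(pvScore t, t)] else scored) acc
      = acc ++ pvKeyed tags := by
  induction tags generalizing acc with
  | nil => simp [pvKeyed]
  | cons t ts ih =>
    simp only [List.foldl_cons, pvKeyed, List.filterMap_cons]
    by_cases h : pvScore t > 0
    · simp [h, ih, pvKeyed]
    · simp [h, ih, pvKeyed]

lemma head_insertBy (x : Int × String) (ys : List (Int × String)) :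
    (PySem.List.insertBy pvLt x ys).head? = pvG ys.head? x := by
  cases ys with
  | nil => simp [PySem.List.insertBy, pvG]
  | cons y t =>
    simp only [PySem.List.insertBy, pvG, List.head?_cons]
    by_cases h : pvLt x y
    · simp [h]
    · simp [h]

lemma head_foldl_insertBy (l : List (Int × String)) (acc : List (Int × String)) :
    (l.foldl (fun acc x => PySem.List.insertBy pvLt x acc) acc).head? = l.foldl pvG acc.head? := by
  induction l generalizing acc with
  | nil => rfl
  | cons x xs ih => simp only [List.foldl_cons, ih, head_insertBy]

lemma head_sorted2 (l : List (Int × String)) :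
    (PySem.List.sorted2 l (fun x => -x.1) (fun x => x.2)).head? = l.foldl pvG none := by
  have h : PySem.List.sorted2 l (fun x => -x.1) (fun x => x.2)
      = l.foldl (fun acc x => PySem.List.insertBy pvLt x acc) [] := rfl
  rw [h, head_foldl_insertBy]
  rfl

lemma cond_iff (s b1 : Int) (t b2 : String) :
    (s > b1 ∨ (s = b1 ∧ t < b2)) ↔ pvLt (s, t) (b1, b2) = true := by
  simp only [pvLt, Bool.or_eq_true, Bool.and_eq_true, Bool.not_eq_true', decide_eq_true_eq,
    decide_eq_false_iff_not]
  constructor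
  · rintro (h | ⟨h1, h2⟩)
    · left; omega
    · right; exact ⟨by omega, h2⟩
  · rintro (h | ⟨h1, h2⟩)
    · left; omega
    · rcases lt_trichotomy s b1 with hl | he | hg
      · exact absurd (by omega : (-b1 : Int) < -s) h1
      · exact Or.inr ⟨he, h2⟩
      · exact Or.inl hg

lemma alt_foldl_eq (tags : List String) (best : Option (Int × String)) :
    tags.foldl (fun best t =>
      if pvScore t > 0 then
        (match best with
         | none => some (pvScore t, t)
         | some b => if pvScore t > b.1 ∨ (pvScore t = b.1 ∧ t < b.2) then some (pvScore t, t) else best)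
      else best) best
    = (pvKeyed tags).foldl pvG best := by
  induction tags generalizing best with
  | nil => rfl
  | cons t ts ih =>
    simp only [List.foldl_cons, pvKeyed, List.filterMap_cons]
    by_cases h : pvScore t > 0
    · rw [if_pos h]
      simp only [h, if_pos, List.foldl_cons]
      rw [ih]
      congr 1
      cases best with
      | none => rfl
      | some b =>
        simp only [pvG]
        by_cases hc : (pvScore t > b.1 ∨ (pvScore t = b.1 ∧ t < b.2))
        · rw [if_pos hc, if_pos ((cond_iff _ _ _ _).mp hc)]
        · rw [if_neg hc, if_neg (fun hb => hc ((cond_iff _ _ _ _).mpr hb))]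
    · rw [if_neg h]
      rw [ih]
      simp [h, pvKeyed]

-- ===== VERDICT (by name: the statement is the Claim_ definition above) =====
theorem detect_reward_tag_spec : Claim_equal_detect_reward_tag := by
  intro tags _
  show detect_reward_tag tags = detect_reward_tag_alt tags
  have hA : detect_reward_tag tags =
      (if tags.foldl (fun scored t => if pvScore t > 0 then scored ++ [(pvScore t, t)] else scored) [] = [] then none
       else
         match PySem.List.sorted2
             (tags.foldl (fun scored t => if pvScore t > 0 then scored ++ [(pvScore t, t)] else scored) [])
             (fun x => -x.1) (fun x => x.2) with
         | [] => none
         | x :: _ => some x.2) := rfl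
  have hB : detect_reward_tag_alt tags =
      (tags.foldl (fun best t =>
        if pvScore t > 0 then
          (match best with
           | none => some (pvScore t, t)
           | some b => if pvScore t > b.1 ∨ (pvScore t = b.1 ∧ t < b.2) then some (pvScore t, t) else best)
        else best) (none : Option (Int × String))).map (fun b => b.2) := rfl
  rw [hA, hB, alt_foldl_eq, scored_eq tags []]
  simp only [List.nil_append]
  by_cases h : pvKeyed tags = []
  · simp [h]
  · rw [if_neg h]
    cases hs : PySem.List.sorted2 (pvKeyed tags) (fun x => -x.1) (fun x => x.2) with
    | nil =>
      exact absurd (List.Perm.nil_eq (hs ▸ PySem.List.sorted2_perm (pvKeyed tags) _ _ false)).symm h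
    | cons x rest =>
      have := head_sorted2 (pvKeyed tags)
      rw [hs] at this
      simp only [List.head?_cons] at this
      rw [← this]
      rfl
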